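-- pv_equiv track=rewrite | github.com/tigressine/dmv | dmv.py | _load_module_dependencies
-- ===== SOURCE A (Python) =====
-- def _load_module_dependencies(module):
--     """Load a module's dependencies into the graph."""
--     module_dependencies = {}
--     for dependency in module["dependencies"]:
--         target_component, target_module = dependency.split(".")
--         if target_component in module_dependencies:
--             module_dependencies[target_component].append(target_module)
--         else:
--             module_dependencies[target_component] = [target_module]
--
--     return module_dependencies
-- ===== SOURCE B (Python) =====
-- def _load_module_dependencies(module):
--     """Load a module's dependencies into the graph."""
--     pairs = []
--     for dependency in module["dependencies"]:
--         target_component, target_module = dependency.split(".")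
--         pairs.append((target_component, target_module))
--     components = dict.fromkeys(component for component, _ in pairs)
--     return {component: [m for c, m in pairs if c == component]
--             for component in components}
-- ===== Notes on version B (the rewrite author's own statement) =====
-- stated objective: alternative
-- what changed: Replaces the incremental if/else dict accumulation with a two-phase strategy: first extract all (component, module) pairs, then dedup the components in first-occurrence order with dict.fromkeys and build each group in one comprehension scan over the pairs.
import Mathlib
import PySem

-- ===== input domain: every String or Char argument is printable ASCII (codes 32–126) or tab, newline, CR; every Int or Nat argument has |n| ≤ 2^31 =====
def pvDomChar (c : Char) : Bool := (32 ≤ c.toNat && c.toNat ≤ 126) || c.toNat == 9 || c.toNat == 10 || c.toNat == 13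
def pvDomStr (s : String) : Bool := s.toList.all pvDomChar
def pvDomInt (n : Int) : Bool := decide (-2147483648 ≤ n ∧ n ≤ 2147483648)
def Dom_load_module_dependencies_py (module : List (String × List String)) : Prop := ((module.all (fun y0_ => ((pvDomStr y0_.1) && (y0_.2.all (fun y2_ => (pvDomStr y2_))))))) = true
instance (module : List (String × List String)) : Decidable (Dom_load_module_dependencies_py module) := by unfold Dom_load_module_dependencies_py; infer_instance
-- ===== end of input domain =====

-- B replaces A's incremental if/else dict accumulation by a two-phase pass (collect pairs,
-- dedup components, group by a scan per component); alternative decomposition, not faster.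

-- ===== PORT A =====
-- one iteration of A's loop over module["dependencies"]
def pvAStep (d : PySem.Dict String (List String)) (dep : String) : PySem.Dict String (List String) :=
  match PySem.Str.split? dep "." with
  | some [tc, tm] =>
      if d.contains tc then
        d.insert tc (d.getD tc [] ++ [tm])   -- module_dependencies[tc].append(tm) (in-place)
      else
        d.insert tc [tm]
  | _ => d   -- unpack raises ValueError here; excluded by Pre_

def load_module_dependencies_py (module : List (String × List String)) : List (String × List String) :=
  -- module["dependencies"]: KeyError (missing key) is excluded by Pre_
  let deps := (PySem.Dict.mk module).getD "dependencies" []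
  (deps.foldl pvAStep PySem.Dict.empty).items

-- ===== PORT B =====
-- first loop of B: collect the (target_component, target_module) pairs
def pvBPairs (deps : List String) : List (String × String) :=
  deps.foldl (fun acc dep =>
    match PySem.Str.split? dep "." with
    | some [tc, tm] => acc ++ [(tc, tm)]
    | _ => acc) []   -- unpack raises ValueError here; excluded by Pre_

def load_module_dependencies_py_alt (module : List (String × List String)) : List (String × List String) :=
  let deps := (PySem.Dict.mk module).getD "dependencies" []
  let pairs := pvBPairs deps
  let components := PySem.List.dedup (pairs.map (fun p => p.1))   -- dict.fromkeys
  components.map (fun c => (c, (pairs.filter (fun p => p.1 == c)).map (fun p => p.2)))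

-- ===== PRECONDITION & SPEC =====
-- Pre_ excludes exactly the inputs where A raises: a missing "dependencies" key (KeyError)
-- or a dependency that does not split on "." into exactly two parts (ValueError on unpack).
def Pre_load_module_dependencies_py (module : List (String × List String)) : Prop :=
  (PySem.Dict.mk module).contains "dependencies" = true ∧
  ∀ dep ∈ (PySem.Dict.mk module).getD "dependencies" [],
    ((PySem.Str.split? dep ".").getD []).length = 2
instance (module : List (String × List String)) : Decidable (Pre_load_module_dependencies_py module) := by unfold Pre_load_module_dependencies_py; infer_instance

def pvWitness_load_module_dependencies_py : (List (String × List String)) :=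
  [("dependencies", ["app.main", "lib.util", "app.cli"])]

def Spec_load_module_dependencies_py (module : List (String × List String)) (out : List (String × List String)) : Prop := out = load_module_dependencies_py_alt module
instance (module : List (String × List String)) (out : List (String × List String)) : Decidable (Spec_load_module_dependencies_py module out) := by unfold Spec_load_module_dependencies_py; infer_instance

-- ===== CLAIM (what is proved, stated in full; the proofs are below) =====
def Claim_equal_load_module_dependencies_py : Prop := ∀ (module : List (String × List String)), Dom_load_module_dependencies_py module → Pre_load_module_dependencies_py module → Spec_load_module_dependencies_py module (load_module_dependencies_py module)

-- ===== LEMMAS AND PROOFS =====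
-- pairs as a flatMap (the shape of pvBPairs after the accumulator is pulled out)
def pvPairOf (dep : String) : List (String × String) :=
  match PySem.Str.split? dep "." with
  | some [tc, tm] => [(tc, tm)]
  | _ => []

theorem pvBPairs_eq_flatMap (deps : List String) :
    pvBPairs deps = deps.flatMap pvPairOf := by
  have h : pvBPairs deps = deps.foldl (fun acc dep => acc ++ pvPairOf dep) [] := by
    unfold pvBPairs
    congr 1
    funext acc dep
    unfold pvPairOf
    cases h : PySem.Str.split? dep "." with
    | none => simp
    | some l =>
      match l with
      | [] => simp
      | [a] => simp
      | [a, b] => simp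
      | a :: b :: c :: t => simp
  rw [h, PySem.List.foldl_append_eq_flatMap]
  simp

theorem pvAStep_eq_modify (d : PySem.Dict String (List String)) (dep tc tm : String)
    (h : PySem.Str.split? dep "." = some [tc, tm]) :
    pvAStep d dep = d.modify tc [] (fun v => v ++ [tm]) := by
  unfold pvAStep PySem.Dict.modify
  rw [h]
  by_cases hc : d.contains tc = true
  · simp [hc]
  · simp only [Bool.not_eq_true] at hc
    simp [hc, PySem.Dict.getD_of_not_contains d [] hc]

-- A's loop over deps is the modify-loop over the extracted pairs
theorem pvFold_eq (deps : List String)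
    (h : ∀ dep ∈ deps, ((PySem.Str.split? dep ".").getD []).length = 2) :
    ∀ d : PySem.Dict String (List String),
      deps.foldl pvAStep d =
        (deps.flatMap pvPairOf).foldl (fun d p => d.modify p.1 [] (fun v => v ++ [p.2])) d := by
  induction deps with
  | nil => intro d; simp
  | cons dep rest ih =>
    intro d
    have hdep := h dep (by simp)
    obtain ⟨tc, tm, hs⟩ : ∃ tc tm, PySem.Str.split? dep "." = some [tc, tm] := by
      cases hsp : PySem.Str.split? dep "." with
      | none => rw [hsp] at hdep; simp at hdep
      | some l =>
        rw [hsp] at hdep; simp at hdep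
        match l, hdep with
        | [a, b], _ => exact ⟨a, b, rfl⟩
    have hrest : ∀ d' ∈ rest, ((PySem.Str.split? d' ".").getD []).length = 2 :=
      fun d' hd' => h d' (by simp [hd'])
    simp only [List.foldl_cons, List.flatMap_cons]
    rw [pvAStep_eq_modify d dep tc tm hs, ih hrest]
    unfold pvPairOf
    rw [hs]
    simp

-- ===== VERDICT (by name: the statement is the Claim_ definition above) =====
theorem load_module_dependencies_py_spec : Claim_equal_load_module_dependencies_py := by
  intro module _hdom hpre
  obtain ⟨_hkey, hsplit⟩ := hpre
  unfold Spec_load_module_dependencies_py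
  unfold load_module_dependencies_py load_module_dependencies_py_alt
  dsimp only
  set deps := (PySem.Dict.mk module).getD "dependencies" [] with hdeps
  rw [pvFold_eq deps hsplit PySem.Dict.empty]
  set P := deps.flatMap pvPairOf with hP
  have hnodup : ((P.foldl (fun d p => d.modify p.1 [] (fun v => v ++ [p.2])) PySem.Dict.empty)).keys.Nodup := by
    exact PySem.Dict.nodup_keys_foldl_modify_key P (fun p => p.1) []
      (fun _ p v => v ++ [p.2]) PySem.Dict.empty (by simp)
  have hkeys : ((P.foldl (fun d p => d.modify p.1 [] (fun v => v ++ [p.2])) PySem.Dict.empty)).keys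
      = PySem.Set.ofList (P.map (fun p => p.1)) := by
    have := PySem.Dict.keys_foldl_modify_key P (fun p => p.1) []
      (fun _ p v => v ++ [p.2]) PySem.Dict.empty
    simpa [PySem.Set.update, PySem.Set.ofList] using this
  rw [PySem.Dict.items_eq_map_keys _ hnodup [], hkeys]
  rw [pvBPairs_eq_flatMap, ← hP]
  unfold PySem.List.dedup
  apply List.map_congr_left
  intro c _
  congr 1
  rw [PySem.Dict.getD_foldl_modify_append]
  simp
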